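-- pv_equiv track=rewrite | github.com/mbartnicki80/WDI | wdikolokwia/zad4.py | zgodne
-- ===== SOURCE A (Python) =====
-- def zgodne(l1, l2):
--
--     tab1 = [0 for i in range(4)]
--
--     while l1>0:
--         tab1[l1%4]=1
--         l1 //= 4
--
--     while l2>0:
--         if tab1[l2%4]==0:
--             return False
--         l2 //= 4
--
--     return True
-- ===== SOURCE B (Python) =====
-- def zgodne(l1, l2):
--     def has_digit(n, d):
--         if n <= 0:
--             return False
--         return n % 4 == d or has_digit(n // 4, d)
--
--     def check(m):
--         if m <= 0:
--             return True
--         return has_digit(l1, m % 4) and check(m // 4)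
--
--     return check(l2)
-- ===== Notes on version B (the rewrite author's own statement) =====
-- stated objective: alternative
-- what changed: Drops A's precomputed 4-slot flag table entirely: B recurses over l2's base-4 digits and, for each digit, re-scans l1's digits by a second recursion to test membership, so no auxiliary data structure is built at all.
import Mathlib
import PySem

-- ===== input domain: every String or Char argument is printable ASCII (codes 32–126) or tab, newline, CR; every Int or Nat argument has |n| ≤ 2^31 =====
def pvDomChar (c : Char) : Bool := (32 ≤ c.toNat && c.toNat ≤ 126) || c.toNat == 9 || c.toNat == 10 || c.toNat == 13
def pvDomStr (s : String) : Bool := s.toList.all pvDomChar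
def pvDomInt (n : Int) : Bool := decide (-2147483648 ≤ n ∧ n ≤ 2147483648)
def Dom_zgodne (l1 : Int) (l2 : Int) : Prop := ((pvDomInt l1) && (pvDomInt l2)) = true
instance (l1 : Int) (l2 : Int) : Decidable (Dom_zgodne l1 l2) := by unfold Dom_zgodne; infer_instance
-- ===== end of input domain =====

-- B drops A's precomputed 4-slot flag table: it recurses over l2's base-4 digits and re-scans l1 for each (alternative decomposition, no auxiliary structure).

-- ===== PORT A =====
-- while l1>0: tab1[l1%4]=1; l1//=4
def zgodneLoop1 (tab1 : List Int) (l1 : Int) : List Int :=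
  if 0 < l1 then
    zgodneLoop1 (PySem.List.pySetD tab1 (PySem.Int.mod l1 4) 1) (PySem.Int.floordiv l1 4)
  else tab1
termination_by l1.toNat
decreasing_by
  rw [PySem.Int.floordiv_eq_ediv_of_pos (by omega)]
  omega

-- while l2>0: if tab1[l2%4]==0: return False; l2//=4
def zgodneLoop2 (tab1 : List Int) (l2 : Int) : Bool :=
  if 0 < l2 then
    if PySem.List.pyGetD tab1 (PySem.Int.mod l2 4) 0 == 0 then false
    else zgodneLoop2 tab1 (PySem.Int.floordiv l2 4)
  else true
termination_by l2.toNat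
decreasing_by
  rw [PySem.Int.floordiv_eq_ediv_of_pos (by omega)]
  omega

def zgodne (l1 : Int) (l2 : Int) : Bool :=
  zgodneLoop2 (zgodneLoop1 ((PySem.List.pyRange 0 4 1).map (fun _ => (0 : Int))) l1) l2

-- ===== PORT B =====
-- has_digit(n, d): if n <= 0: return False; return n % 4 == d or has_digit(n // 4, d)
def hasDigitB (n : Int) (d : Int) : Bool :=
  if n ≤ 0 then false
  else (PySem.Int.mod n 4 == d) || hasDigitB (PySem.Int.floordiv n 4) d
termination_by n.toNat
decreasing_by
  rw [PySem.Int.floordiv_eq_ediv_of_pos (by omega)]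
  omega

-- check(m): if m <= 0: return True; return has_digit(l1, m % 4) and check(m // 4)
def checkB (l1 : Int) (m : Int) : Bool :=
  if m ≤ 0 then true
  else hasDigitB l1 (PySem.Int.mod m 4) && checkB l1 (PySem.Int.floordiv m 4)
termination_by m.toNat
decreasing_by
  rw [PySem.Int.floordiv_eq_ediv_of_pos (by omega)]
  omega

def zgodne_alt (l1 : Int) (l2 : Int) : Bool := checkB l1 l2

-- ===== PRECONDITION & SPEC =====
def Spec_zgodne (l1 : Int) (l2 : Int) (out : Bool) : Prop := out = zgodne_alt l1 l2
instance (l1 : Int) (l2 : Int) (out : Bool) : Decidable (Spec_zgodne l1 l2 out) := by unfold Spec_zgodne; infer_instance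

-- ===== CLAIM (what is proved, stated in full; the proofs are below) =====
def Claim_equal_zgodne : Prop := ∀ (l1 : Int) (l2 : Int), Dom_zgodne l1 l2 → Spec_zgodne l1 l2 (zgodne l1 l2)

-- ===== LEMMAS AND PROOFS =====

theorem hasDigitB_nonpos (n d : Int) (h : n ≤ 0) : hasDigitB n d = false := by
  rw [hasDigitB, if_pos h]

theorem hasDigitB_pos (n d : Int) (h : 0 < n) :
    hasDigitB n d = ((PySem.Int.mod n 4 == d) || hasDigitB (PySem.Int.floordiv n 4) d) := by
  rw [hasDigitB, if_neg (by omega)]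

theorem hasDigitB_bounds (n d : Int) (h : hasDigitB n d = true) : 0 ≤ d ∧ d < 4 := by
  induction n using hasDigitB.induct with
  | case1 n hn =>
    rw [hasDigitB_nonpos n d hn] at h
    exact absurd h (by simp)
  | case2 n hn ih =>
    rw [hasDigitB_pos n d (by omega)] at h
    rcases Bool.or_eq_true_iff.mp h with h1 | h1
    · have := PySem.Int.mod_nonneg n (b := 4) (by omega)
      have := PySem.Int.mod_lt n (b := 4) (by omega)
      have : PySem.Int.mod n 4 = d := by exact_mod_cast eq_of_beq h1
      omega
    · exact ih h1

theorem loop1_getD (l1 : Int) (tab : List Int) (d : Int) (hd0 : 0 ≤ d) (hd4 : d < 4)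
    (hlen : d.toNat < tab.length) :
    PySem.List.pyGetD (zgodneLoop1 tab l1) d 0
      = if hasDigitB l1 d then 1 else PySem.List.pyGetD tab d 0 := by
  induction tab, l1 using zgodneLoop1.induct with
  | case1 tab l1 hn ih =>
    have hm0 : 0 ≤ PySem.Int.mod l1 4 := PySem.Int.mod_nonneg l1 (by omega)
    rw [zgodneLoop1, if_pos hn, hasDigitB_pos l1 d hn,
        ih (by rwa [PySem.List.length_pySetD])]
    rw [PySem.List.pySetD_of_nonneg tab 1 hm0,
        PySem.List.pyGetD_of_nonneg _ 0 hd0, PySem.List.pyGetD_of_nonneg tab 0 hd0]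
    rw [List.getD_eq_getElem?_getD, List.getElem?_set, List.getD_eq_getElem?_getD]
    have hmod : PySem.Int.mod l1 4 = l1 % 4 := PySem.Int.mod_eq_emod_of_pos (by omega)
    rw [hmod] at hm0
    by_cases hmd : l1 % 4 = d
    · simp [hmd, hlen]
    · have hne : (l1 % 4).toNat ≠ d.toNat := by omega
      by_cases hh : hasDigitB (PySem.Int.floordiv l1 4) d = true <;> simp [*]
  | case2 tab l1 hn =>
    rw [zgodneLoop1, if_neg hn, hasDigitB_nonpos l1 d (by omega)]; simp

theorem loop2_iff (tab : List Int) (l2 : Int) :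
    zgodneLoop2 tab l2 = true ↔
      ∀ d, hasDigitB l2 d = true → PySem.List.pyGetD tab d 0 ≠ 0 := by
  induction l2 using zgodneLoop2.induct (tab1 := tab) with
  | case1 l2 hn hz =>
    rw [zgodneLoop2, if_pos hn, if_pos hz]
    constructor
    · intro h; exact absurd h (by simp)
    · intro h
      refine absurd (h (PySem.Int.mod l2 4) ?_) (by simpa using hz)
      rw [hasDigitB_pos l2 _ hn]
      simp
  | case2 l2 hn hz ih =>
    rw [zgodneLoop2, if_pos hn, if_neg hz, ih]
    constructor
    · intro h d hd
      rw [hasDigitB_pos l2 d hn] at hd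
      rcases Bool.or_eq_true_iff.mp hd with h1 | h1
      · have : PySem.Int.mod l2 4 = d := by exact_mod_cast eq_of_beq h1
        rw [← this]; simpa using hz
      · exact h d h1
    · intro h d hd
      exact h d (by rw [hasDigitB_pos l2 d hn, hd]; simp)
  | case3 l2 hn =>
    rw [zgodneLoop2, if_neg hn]
    constructor
    · intro _ d hd; rw [hasDigitB_nonpos l2 d (by omega)] at hd; exact absurd hd (by simp)
    · intro _; rfl

theorem checkB_iff (l1 : Int) (l2 : Int) :
    checkB l1 l2 = true ↔ ∀ d, hasDigitB l2 d = true → hasDigitB l1 d = true := by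
  induction l2 using checkB.induct with
  | case1 l2 hn =>
    rw [checkB, if_pos hn]
    constructor
    · intro _ d hd; rw [hasDigitB_nonpos l2 d hn] at hd; exact absurd hd (by simp)
    · intro _; rfl
  | case2 l2 hn ih =>
    rw [checkB, if_neg hn, Bool.and_eq_true, ih]
    constructor
    · intro ⟨h0, h⟩ d hd
      rw [hasDigitB_pos l2 d (by omega)] at hd
      rcases Bool.or_eq_true_iff.mp hd with h1 | h1
      · have : PySem.Int.mod l2 4 = d := by exact_mod_cast eq_of_beq h1
        rwa [← this]
      · exact h d h1
    · intro h
      refine ⟨h _ (by rw [hasDigitB_pos l2 _ (by omega)]; simp), fun d hd => h d ?_⟩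
      rw [hasDigitB_pos l2 d (by omega), hd]; simp

theorem tab0_len : ((PySem.List.pyRange 0 4 1).map (fun _ => (0 : Int))).length = 4 := by decide

theorem tab0_getD (d : Int) (h0 : 0 ≤ d) :
    PySem.List.pyGetD ((PySem.List.pyRange 0 4 1).map (fun _ => (0 : Int))) d 0 = 0 := by
  rw [PySem.List.pyGetD_of_nonneg _ 0 h0]
  have : (PySem.List.pyRange 0 4 1).map (fun _ => (0 : Int)) = [0, 0, 0, 0] := by decide
  rw [this]
  rcases d.toNat with _|_|_|_|n <;> simp [List.getD]

-- ===== VERDICT (by name: the statement is the Claim_ definition above) =====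
theorem zgodne_spec : Claim_equal_zgodne := by
  intro l1 l2 _
  unfold Spec_zgodne
  have key : zgodne l1 l2 = true ↔ zgodne_alt l1 l2 = true := by
    unfold zgodne zgodne_alt
    rw [loop2_iff, checkB_iff]
    constructor
    · intro h d hd
      have hb := hasDigitB_bounds _ _ hd
      have h3 := h d hd
      rw [loop1_getD l1 _ d hb.1 hb.2 (by rw [tab0_len]; omega)] at h3
      by_contra hno
      rw [if_neg hno, tab0_getD d hb.1] at h3
      exact h3 rfl
    · intro h d hd
      have hb := hasDigitB_bounds _ _ hd
      rw [loop1_getD l1 _ d hb.1 hb.2 (by rw [tab0_len]; omega), if_pos (h d hd)]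
      omega
  exact Bool.eq_iff_iff.mpr key
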